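-- pv_equiv track=rewrite | github.com/jonathonfletcher/adventofcode | 2024/24/a.py | evaluate
-- ===== SOURCE A (Python) =====
-- def evaluate(gates: list, inputs: dict, /) -> dict:
--     ok = True
--     while len(gates) > 0:
--         newgates = list()
--         allsyms = frozenset(inputs.keys())
--         for sym1, sym2, op, sym3 in gates:
--             if sym1 in allsyms and sym2 in allsyms:
--                 if op == 'AND':
--                     inputs[sym3] = inputs[sym1] & inputs[sym2]
--                 elif op == 'OR':
--                     inputs[sym3] = inputs[sym1] | inputs[sym2]
--                 elif op == 'XOR':
--                     inputs[sym3] = inputs[sym1] ^ inputs[sym2]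
--             else:
--                 newgates.append((sym1, sym2, op, sym3))
--         if gates == newgates:
--             gates = list()
--             ok = False
--         else:
--             gates = newgates
--     return ok, inputs
-- ===== SOURCE B (Python) =====
-- # Worklist evaluation: gates are indexed by their first missing input symbol, so each
-- # gate is re-examined only when that symbol becomes defined, instead of rescanning
-- # the whole gate list on every pass.  (Mutates `inputs` in place, like the original.)
-- def evaluate(gates: list, inputs: dict, /) -> dict:
--     n = len(gates)
--     waiting = {}   # symbol -> list of (index, gate) waiting for that symbol
--     ready = []     # (index, gate) with both input symbols currently defined
--     for i, g in enumerate(gates):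
--         s1, s2, _, _ = g
--         if s1 not in inputs:
--             waiting.setdefault(s1, []).append((i, g))
--         elif s2 not in inputs:
--             waiting.setdefault(s2, []).append((i, g))
--         else:
--             ready.append((i, g))
--     done = 0
--     while ready:
--         newsyms = []   # symbols first defined during this round, in definition order
--         for _, (s1, s2, op, s3) in ready:
--             done += 1
--             if op == 'AND':
--                 v = inputs[s1] & inputs[s2]
--             elif op == 'OR':
--                 v = inputs[s1] | inputs[s2]
--             elif op == 'XOR':
--                 v = inputs[s1] ^ inputs[s2]
--             else:
--                 continue
--             if s3 not in inputs:
--                 newsyms.append(s3)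
--             inputs[s3] = v
--         nxt = []
--         for s in newsyms:
--             for i, g in waiting.pop(s, []):
--                 s1, s2, _, _ = g
--                 if s1 not in inputs:
--                     waiting.setdefault(s1, []).append((i, g))
--                 elif s2 not in inputs:
--                     waiting.setdefault(s2, []).append((i, g))
--                 else:
--                     nxt.append((i, g))
--         nxt.sort(key=lambda p: p[0])
--         ready = nxt
--     return done == n, inputs
-- ===== Notes on version B (the rewrite author's own statement) =====
-- stated objective: alternative
-- what changed: A rescans the whole remaining gate list on every resolution pass; B indexes each blocked gate under its first missing input symbol in a dict and, when a symbol first becomes defined, re-examines only the gates waiting on it (worklist/topological evaluation), re-filing each gate O(1) times instead of rescanning it every round.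
import Mathlib
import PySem

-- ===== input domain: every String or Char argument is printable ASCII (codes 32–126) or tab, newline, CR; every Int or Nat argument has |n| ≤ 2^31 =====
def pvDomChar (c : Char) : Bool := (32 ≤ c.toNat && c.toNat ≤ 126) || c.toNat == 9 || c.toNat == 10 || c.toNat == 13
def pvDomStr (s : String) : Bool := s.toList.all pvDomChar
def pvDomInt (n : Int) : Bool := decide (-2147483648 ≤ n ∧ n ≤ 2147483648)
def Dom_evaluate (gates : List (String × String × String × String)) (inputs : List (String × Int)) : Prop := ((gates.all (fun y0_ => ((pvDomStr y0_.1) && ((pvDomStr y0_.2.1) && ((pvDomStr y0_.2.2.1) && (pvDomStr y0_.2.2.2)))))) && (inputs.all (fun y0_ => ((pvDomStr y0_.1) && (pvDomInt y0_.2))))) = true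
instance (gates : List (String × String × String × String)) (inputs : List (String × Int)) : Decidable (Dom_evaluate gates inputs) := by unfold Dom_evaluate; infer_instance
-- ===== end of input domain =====

-- B replaces A's repeated full rescans of the gate list (one pass per round over ALL
-- remaining gates) by a worklist: gates are indexed by their first missing input symbol
-- and re-examined only when that symbol becomes defined.  Equivalence is for the return
-- value; like A, the Python B mutates the `inputs` dict in place.

abbrev PvGate := String × String × String × String
abbrev PvVals := PySem.Dict String Int
abbrev PvWait := PySem.Dict String (List (Int × PvGate))

-- ===== PORT A =====
def pvEvalGate (vals : PvVals) (g : PvGate) : PvVals :=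
  if g.2.2.1 = "AND" then vals.insert g.2.2.2 (PySem.Int.band (vals.getD g.1 0) (vals.getD g.2.1 0))
  else if g.2.2.1 = "OR" then vals.insert g.2.2.2 (PySem.Int.bor (vals.getD g.1 0) (vals.getD g.2.1 0))
  else if g.2.2.1 = "XOR" then vals.insert g.2.2.2 (PySem.Int.bxor (vals.getD g.1 0) (vals.getD g.2.1 0))
  else vals

-- one `for sym1, sym2, op, sym3 in gates` pass, with `allsyms` the key snapshot
def pvPassA (allsyms : List String) (gs : List PvGate) (vals : PvVals) : List PvGate × PvVals :=
  gs.foldl (fun acc g =>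
    if allsyms.contains g.1 && allsyms.contains g.2.1 then (acc.1, pvEvalGate acc.2 g)
    else (acc.1 ++ [g], acc.2)) ([], vals)

-- the `while len(gates) > 0` loop; each productive pass shrinks `gates`, so
-- `gates.length + 1` fuel is never exhausted (guard only, not an algorithm switch)
def pvLoopA : Nat → List PvGate → PvVals → Bool × PvVals
  | 0, _, vals => (false, vals)
  | f+1, gs, vals =>
    if gs = [] then (true, vals)
    else
      let r := pvPassA vals.keys gs vals
      if r.1 = gs then (false, r.2) else pvLoopA f r.1 r.2

def evaluate (gates : List (String × String × String × String)) (inputs : List (String × Int)) : Bool × (List (String × Int)) :=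
  let r := pvLoopA (gates.length + 1) gates (PySem.Dict.ofList inputs)
  (r.1, r.2.items)

-- ===== PORT B =====
-- file a gate under its first missing input symbol, or emit it as ready
def pvFile (vals : PvVals) (st : PvWait × List (Int × PvGate)) (p : Int × PvGate) : PvWait × List (Int × PvGate) :=
  if vals.contains p.2.1 = false then (st.1.modify p.2.1 [] (· ++ [p]), st.2)
  else if vals.contains p.2.2.1 = false then (st.1.modify p.2.2.1 [] (· ++ [p]), st.2)
  else (st.1, st.2 ++ [p])

-- evaluate one ready gate, recording symbols first defined this round
def pvApplyGate (acc : PvVals × List String) (g : PvGate) : PvVals × List String :=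
  if g.2.2.1 = "AND" then
    (acc.1.insert g.2.2.2 (PySem.Int.band (acc.1.getD g.1 0) (acc.1.getD g.2.1 0)),
     if acc.1.contains g.2.2.2 then acc.2 else acc.2 ++ [g.2.2.2])
  else if g.2.2.1 = "OR" then
    (acc.1.insert g.2.2.2 (PySem.Int.bor (acc.1.getD g.1 0) (acc.1.getD g.2.1 0)),
     if acc.1.contains g.2.2.2 then acc.2 else acc.2 ++ [g.2.2.2])
  else if g.2.2.1 = "XOR" then
    (acc.1.insert g.2.2.2 (PySem.Int.bxor (acc.1.getD g.1 0) (acc.1.getD g.2.1 0)),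
     if acc.1.contains g.2.2.2 then acc.2 else acc.2 ++ [g.2.2.2])
  else acc

-- `for i, g in waiting.pop(s, [])`: re-file or release the gates waiting on s
def pvTrigger (vals : PvVals) (st : PvWait × List (Int × PvGate)) (s : String) : PvWait × List (Int × PvGate) :=
  (st.1.getD s []).foldl (pvFile vals) (st.1.erase s, st.2)

-- the `while ready` loop; ≤ n productive rounds, so n + 1 fuel is never exhausted
def pvLoopB (n : Nat) : Nat → PvWait → List (Int × PvGate) → PvVals → Nat → Bool × PvVals
  | 0, _, _, vals, done => (decide (done = n), vals)
  | f+1, w, ready, vals, done =>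
    if ready = [] then (decide (done = n), vals)
    else
      let rv := ready.foldl (fun acc p => pvApplyGate acc p.2) (vals, [])
      let tw := rv.2.foldl (pvTrigger rv.1) (w, [])
      pvLoopB n f tw.1 (PySem.List.sorted tw.2 (fun p => p.1) false) rv.1 (done + ready.length)

def evaluate_alt (gates : List (String × String × String × String)) (inputs : List (String × Int)) : Bool × (List (String × Int)) :=
  let d := PySem.Dict.ofList inputs
  let init := (PySem.List.enumerate gates).foldl (pvFile d) (PySem.Dict.empty, [])
  let r := pvLoopB gates.length (gates.length + 1) init.1 init.2 d 0
  (r.1, r.2.items)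

-- ===== PRECONDITION & SPEC =====
def Spec_evaluate (gates : List (String × String × String × String)) (inputs : List (String × Int)) (out : Bool × (List (String × Int))) : Prop := out = evaluate_alt gates inputs
instance (gates : List (String × String × String × String)) (inputs : List (String × Int)) (out : Bool × (List (String × Int))) : Decidable (Spec_evaluate gates inputs out) := by unfold Spec_evaluate; infer_instance

-- ===== CLAIM (what is proved, stated in full; the proofs are below) =====
def Claim_equal_evaluate : Prop := ∀ (gates : List (String × String × String × String)) (inputs : List (String × Int)), Dom_evaluate gates inputs → Spec_evaluate gates inputs (evaluate gates inputs)

-- ===== LEMMAS AND PROOFS =====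

theorem pv_get?_erase_self {ν : Type} (d : PySem.Dict String ν) (s : String) :
    (d.erase s).get? s = none := by
  simp only [PySem.Dict.erase, PySem.Dict.get?, Option.map_eq_none_iff]
  apply List.find?_eq_none.mpr
  intro p hp
  have := List.of_mem_filter hp
  simpa using this

theorem pv_get?_erase_of_ne {ν : Type} (d : PySem.Dict String ν) (s s' : String) (h : s' ≠ s) :
    (d.erase s).get? s' = d.get? s' := by
  simp only [PySem.Dict.erase, PySem.Dict.get?]
  congr 1
  induction d.items with
  | nil => rfl
  | cons p t ih =>
    by_cases hp : p.1 = s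
    · have hb : (p.1 == s') = false := beq_eq_false_iff_ne.mpr (by rw [hp]; exact Ne.symm h)
      have hbs : (p.1 == s) = true := beq_iff_eq.mpr hp
      simp [List.filter_cons, List.find?_cons, hbs, hb, ih]
    · have hb : (p.1 == s) = false := beq_eq_false_iff_ne.mpr hp
      by_cases hp' : p.1 = s'
      · have hbs' : (p.1 == s') = true := beq_iff_eq.mpr hp'
        simp [List.filter_cons, List.find?_cons, hb, hbs']
      · have hb' : (p.1 == s') = false := beq_eq_false_iff_ne.mpr hp'
        simp [List.filter_cons, List.find?_cons, hb, hb', ih]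

theorem pv_keys_erase {ν : Type} (d : PySem.Dict String ν) (s : String) :
    (d.erase s).keys = d.keys.filter (fun k => !(k == s)) := by
  simp only [PySem.Dict.erase, PySem.Dict.keys]
  induction d.items with
  | nil => rfl
  | cons p t ih => by_cases hp : (p.1 == s) <;> simp [List.filter_cons, hp, ih]

theorem pv_nodup_keys_erase {ν : Type} (d : PySem.Dict String ν) (s : String)
    (h : d.keys.Nodup) : (d.erase s).keys.Nodup := by
  rw [pv_keys_erase]; exact h.filter _

theorem pv_keys_contains {ν : Type} (d : PySem.Dict String ν) (s : String) :
    d.keys.contains s = d.contains s := by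
  simp only [PySem.Dict.keys, PySem.Dict.contains]
  induction d.items with
  | nil => rfl
  | cons p t ih =>
    simp only [List.any_cons, List.map_cons, List.contains_cons] at ih ⊢
    rw [← ih, Bool.beq_comm]

theorem pv_flat_erase {τ : Type} (d : PySem.Dict String (List τ)) (s : String)
    (h : d.keys.Nodup) :
    (d.values.flatten).Perm (d.getD s [] ++ (d.erase s).values.flatten) := by
  obtain ⟨l⟩ := d
  simp only [PySem.Dict.values, PySem.Dict.getD, PySem.Dict.get?, PySem.Dict.erase,
    PySem.Dict.keys] at *
  induction l with
  | nil => simp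
  | cons p t ih =>
    simp only [List.map_cons, List.nodup_cons] at h
    by_cases hp : p.1 = s
    · subst hp
      have hft : t.filter (fun q => !(q.1 == p.1)) = t :=
        List.filter_eq_self.mpr (fun q hq => by
          simp only [Bool.not_eq_eq_eq_not, Bool.not_true, beq_eq_false_iff_ne, ne_eq]
          intro hc; exact h.1 (hc ▸ List.mem_map_of_mem hq))
      simp [List.find?_cons, List.filter_cons, hft]
    · have hb : (p.1 == s) = false := beq_eq_false_iff_ne.mpr hp
      have ih' := ih h.2
      simp only [List.find?_cons, List.filter_cons, hb, Bool.not_false, if_true,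
        List.map_cons, List.flatten_cons, cond_false]
      refine List.Perm.trans (ih'.append_left p.2) ?_
      rw [← List.append_assoc, ← List.append_assoc]
      exact (List.perm_append_comm).append_right _

theorem pv_map_eq_self {α : Type} (t : List α) (f : α → α) (h : ∀ x ∈ t, f x = x) :
    t.map f = t := by
  induction t with
  | nil => rfl
  | cons a t ih => simp only [List.map_cons, h a (by simp)]
                   rw [ih (fun x hx => h x (by simp [hx]))]

theorem pv_flat_insert {τ : Type} (d : PySem.Dict String (List τ)) (s : String) (v : List τ)
    (h : d.keys.Nodup) :
    ((d.insert s v).values.flatten).Perm (v ++ (d.erase s).values.flatten) := by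
  obtain ⟨l⟩ := d
  simp only [PySem.Dict.values, PySem.Dict.insert, PySem.Dict.contains, PySem.Dict.erase,
    PySem.Dict.keys] at *
  induction l with
  | nil => simp
  | cons p t ih =>
    simp only [List.map_cons, List.nodup_cons] at h
    by_cases hp : p.1 = s
    · subst hp
      have hkt : ∀ q ∈ t, (q.1 == p.1) = false := fun q hq =>
        beq_eq_false_iff_ne.mpr (fun hc => h.1 (hc ▸ List.mem_map_of_mem hq))
      have hft : t.filter (fun q => !(q.1 == p.1)) = t :=
        List.filter_eq_self.mpr (fun q hq => by rw [hkt q hq]; rfl)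
      have hmt : t.map (fun q => if (q.1 == p.1) = true then (p.1, v) else q) = t :=
        pv_map_eq_self _ _ (fun q hq => by rw [hkt q hq]; simp)
      simp only [List.any_cons, beq_self_eq_true, Bool.true_or, if_pos, List.map_cons,
        beq_iff_eq, if_true, List.flatten_cons, List.filter_cons, Bool.not_true, cond_true]
      refine List.Perm.append_left v ?_
      rw [pv_map_eq_self t (fun p_1 => if p_1.1 = p.1 then (p.1, v) else p_1) (fun q hq => by
        have := hkt q hq; simp only [beq_eq_false_iff_ne, ne_eq] at this; simp [this])]
      simp [hft]
    · have hb : (p.1 == s) = false := beq_eq_false_iff_ne.mpr hp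
      have ih' := ih h.2
      by_cases hct : (t.any fun q => q.1 == s) = true
      · simp only [List.any_cons, hb, Bool.false_or, hct, if_pos, List.map_cons, hb,
          Bool.false_eq_true, if_false, List.flatten_cons, List.filter_cons,
          Bool.not_false, cond_false] at ih' ⊢
        exact (ih'.append_left p.2).trans (by
          rw [← List.append_assoc, ← List.append_assoc]
          exact (List.perm_append_comm).append_right _)
      · have hct' : (t.any fun q => q.1 == s) = false := by
          cases hq : (t.any fun q => q.1 == s) with
          | true => exact absurd hq hct
          | false => rfl
        simp only [List.any_cons, hb, Bool.false_or, hct', Bool.false_eq_true, if_false, List.map_append,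
          List.map_cons, List.flatten_cons, List.flatten_append, List.filter_cons,
          Bool.not_false, cond_false, List.map_nil, List.flatten_nil, List.append_nil] at ih' ⊢
        rw [List.append_assoc]
        exact (ih'.append_left p.2).trans (by
          simp only [if_true, List.map_cons, List.flatten_cons]
          rw [← List.append_assoc, ← List.append_assoc]
          exact (List.perm_append_comm).append_right _)
-- proof-only notions
def pvKnown (vals : PvVals) (g : PvGate) : Bool := vals.contains g.1 && vals.contains g.2.1

def pvKeyCond (vals : PvVals) (S : List String) (w : PvWait) : Prop :=
  ∀ s lst, w.get? s = some lst →
    (vals.contains s = false ∨ s ∈ S) ∧ ∀ p ∈ lst, s = p.2.1 ∨ s = p.2.2.1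

theorem pv_flat_modify {τ : Type} (d : PySem.Dict String (List τ)) (s : String) (p : τ)
    (h : d.keys.Nodup) :
    ((d.modify s [] (· ++ [p])).values.flatten).Perm (d.values.flatten ++ [p]) := by
  have h1 := pv_flat_insert d s (d.getD s [] ++ [p]) h
  have h2 := pv_flat_erase d s h
  simp only [PySem.Dict.modify]
  refine h1.trans ?_
  refine List.Perm.trans ?_ ((h2.append_right [p]).symm)
  rw [List.append_assoc, List.append_assoc]
  exact List.Perm.append_left _ List.perm_append_comm

theorem pv_mem_flat {τ : Type} (d : PySem.Dict String (List τ)) (h : d.keys.Nodup)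
    (p : τ) (hp : p ∈ d.values.flatten) : ∃ s lst, d.get? s = some lst ∧ p ∈ lst := by
  simp only [PySem.Dict.values] at hp
  obtain ⟨l, hl, hpl⟩ := List.mem_flatten.mp hp
  obtain ⟨pr, hpr, rfl⟩ := List.mem_map.mp hl
  refine ⟨pr.1, pr.2, ?_, hpl⟩
  exact PySem.Dict.get?_of_mem_items _ (by simpa using hpr) h

-- a pass of A over the remaining gates is: drop the ready gates from the list,
-- fold the evaluation over exactly the ready gates
theorem pvPassA_eq (vals : PvVals) (L : List (Int × PvGate)) :
    ∀ (acc : List PvGate) (v : PvVals),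
    (L.map Prod.snd).foldl (fun acc g =>
        if vals.keys.contains g.1 && vals.keys.contains g.2.1 then (acc.1, pvEvalGate acc.2 g)
        else (acc.1 ++ [g], acc.2)) (acc, v)
      = (acc ++ (L.filter (fun p => !pvKnown vals p.2)).map Prod.snd,
         ((L.filter (fun p => pvKnown vals p.2)).map Prod.snd).foldl pvEvalGate v) := by
  induction L with
  | nil => intro acc v; simp
  | cons p t ih =>
    intro acc v
    have hc : (vals.keys.contains p.2.1 && vals.keys.contains p.2.2.1) = pvKnown vals p.2 := by
      rw [pv_keys_contains, pv_keys_contains]; rfl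
    cases hk : pvKnown vals p.2 with
    | true =>
      simp only [List.map_cons, List.foldl_cons, hc, hk, if_true, List.filter_cons, ite_true]
      exact ih acc (pvEvalGate v p.2)
    | false =>
      simp only [List.map_cons, List.foldl_cons, hc, hk, Bool.false_eq_true, if_false,
        List.filter_cons, ite_false, Bool.not_false, ite_true]
      have := ih (acc ++ [p.2]) v
      simpa using this

theorem pvEvalGate_nodup (vals : PvVals) (g : PvGate) (h : vals.keys.Nodup) :
    (pvEvalGate vals g).keys.Nodup := by
  unfold pvEvalGate
  split_ifs <;> first | exact PySem.Dict.nodup_keys_insert _ _ _ h | exact h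

theorem pvFoldEval_nodup (gs : List PvGate) : ∀ (vals : PvVals), vals.keys.Nodup →
    (gs.foldl pvEvalGate vals).keys.Nodup := by
  induction gs with
  | nil => intro vals h; exact h
  | cons g t ih => intro vals h; exact ih _ (pvEvalGate_nodup vals g h)

-- one ready gate of B's round = one evaluation step of A, plus the new-symbol log
theorem pvApplyGate_step (vals : PvVals) (syms : List String) (g : PvGate) :
    ∃ d : List String, pvApplyGate (vals, syms) g = (pvEvalGate vals g, syms ++ d) ∧
      (pvEvalGate vals g).keys = vals.keys ++ d := by
  have key : ∀ val : Int, ∃ d : List String,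
      (vals.insert g.2.2.2 val,
        if vals.contains g.2.2.2 then syms else syms ++ [g.2.2.2])
        = (vals.insert g.2.2.2 val, syms ++ d) ∧
      (vals.insert g.2.2.2 val).keys = vals.keys ++ d := by
    intro val
    by_cases hc : vals.contains g.2.2.2 = true
    · exact ⟨[], by simp [hc], by simp [PySem.Dict.keys_insert_of_contains vals val hc]⟩
    · have hc' : vals.contains g.2.2.2 = false := by
        cases h : vals.contains g.2.2.2 with
        | true => exact absurd h hc
        | false => rfl
      exact ⟨[g.2.2.2], by simp [hc'],
        PySem.Dict.keys_insert_of_not_contains vals val hc'⟩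
  unfold pvApplyGate pvEvalGate
  by_cases h1 : g.2.2.1 = "AND"
  · simp only [h1, if_true]
    exact key _
  · by_cases h2 : g.2.2.1 = "OR"
    · simp only [h1, h2, if_true, if_false]
      exact key _
    · by_cases h3 : g.2.2.1 = "XOR"
      · simp only [h1, h2, h3, if_true, if_false]
        exact key _
      · simp only [h1, h2, h3, if_false]
        exact ⟨[], by simp, by simp⟩

-- B's round fold computes A's evaluation fold; the logged symbols are the new keys
theorem pvRoundAux (r : List (Int × PvGate)) : ∀ (vals : PvVals) (syms : List String),
    ∃ extra : List String,
      r.foldl (fun acc p => pvApplyGate acc p.2) (vals, syms)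
        = ((r.map Prod.snd).foldl pvEvalGate vals, syms ++ extra) ∧
      ((r.map Prod.snd).foldl pvEvalGate vals).keys = vals.keys ++ extra := by
  induction r with
  | nil => intro vals syms; exact ⟨[], by simp, by simp⟩
  | cons p t ih =>
    intro vals syms
    obtain ⟨d, hstep, hkeys⟩ := pvApplyGate_step vals syms p.2
    obtain ⟨extra, hfold, hkeys'⟩ := ih (pvEvalGate vals p.2) (syms ++ d)
    refine ⟨d ++ extra, ?_, ?_⟩
    · simp only [List.foldl_cons, hstep, hfold, List.append_assoc, List.map_cons]
    · simp only [List.map_cons, List.foldl_cons, hkeys', hkeys, List.append_assoc]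

-- the gate-filing fold: emits exactly the ready gates (in order), conserves the
-- waiting pool up to permutation, and preserves the key discipline
theorem pvFileAux (vals : PvVals) (S : List String) (lst : List (Int × PvGate)) :
    ∀ (w : PvWait) (acc : List (Int × PvGate)),
    pvKeyCond vals S w → w.keys.Nodup →
    (lst.foldl (pvFile vals) (w, acc)).2 = acc ++ lst.filter (fun p => pvKnown vals p.2) ∧
    ((lst.foldl (pvFile vals) (w, acc)).1.values.flatten).Perm
      (w.values.flatten ++ lst.filter (fun p => !pvKnown vals p.2)) ∧
    pvKeyCond vals S (lst.foldl (pvFile vals) (w, acc)).1 ∧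
    (lst.foldl (pvFile vals) (w, acc)).1.keys.Nodup := by
  induction lst with
  | nil => intro w acc hkc hnd; exact ⟨by simp, by simp, hkc, hnd⟩
  | cons p t ih =>
    intro w acc hkc hnd
    by_cases h1 : vals.contains p.2.1 = false
    · have hk : pvKnown vals p.2 = false := by simp [pvKnown, h1]
      have hstep : pvFile vals (w, acc) p = (w.modify p.2.1 [] (· ++ [p]), acc) := by
        simp [pvFile, h1]
      have hkc' : pvKeyCond vals S (w.modify p.2.1 [] (· ++ [p])) := by
        intro s lst' hs
        simp only [PySem.Dict.modify, PySem.Dict.get?_insert] at hs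
        by_cases hss : s = p.2.1
        · subst hss
          rw [if_pos rfl] at hs
          injection hs with hs; subst hs
          refine ⟨Or.inl h1, ?_⟩
          intro q hq
          rcases List.mem_append.mp hq with hq | hq
          · cases hget : w.get? p.2.1 with
            | none => rw [PySem.Dict.getD_eq_get?_getD, hget] at hq; simp at hq
            | some l0 =>
              rw [PySem.Dict.getD_eq_get?_getD, hget] at hq
              exact (hkc p.2.1 l0 hget).2 q hq
          · simp only [List.mem_singleton] at hq; subst hq; exact Or.inl rfl
        · rw [if_neg hss] at hs; exact hkc s lst' hs
      have hnd' : (w.modify p.2.1 [] (· ++ [p])).keys.Nodup := by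
        simp only [PySem.Dict.modify]; exact PySem.Dict.nodup_keys_insert _ _ _ hnd
      obtain ⟨e1, e2, e3, e4⟩ := ih (w.modify p.2.1 [] (· ++ [p])) acc hkc' hnd'
      rw [List.foldl_cons, hstep]
      refine ⟨by rw [e1]; simp [List.filter_cons, hk], ?_, e3, e4⟩
      refine e2.trans ?_
      refine List.Perm.trans ((pv_flat_modify w p.2.1 p hnd).append_right _) ?_
      simp [List.filter_cons, hk, List.append_assoc]
    · have h1' : vals.contains p.2.1 = true := by
        cases h : vals.contains p.2.1 with
        | true => rfl
        | false => exact absurd h h1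
      by_cases h2 : vals.contains p.2.2.1 = false
      · have hk : pvKnown vals p.2 = false := by simp [pvKnown, h2]
        have hstep : pvFile vals (w, acc) p = (w.modify p.2.2.1 [] (· ++ [p]), acc) := by
          simp [pvFile, h1', h2]
        have hkc' : pvKeyCond vals S (w.modify p.2.2.1 [] (· ++ [p])) := by
          intro s lst' hs
          simp only [PySem.Dict.modify, PySem.Dict.get?_insert] at hs
          by_cases hss : s = p.2.2.1
          · subst hss
            rw [if_pos rfl] at hs
            injection hs with hs; subst hs
            refine ⟨Or.inl h2, ?_⟩
            intro q hq
            rcases List.mem_append.mp hq with hq | hq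
            · cases hget : w.get? p.2.2.1 with
              | none => rw [PySem.Dict.getD_eq_get?_getD, hget] at hq; simp at hq
              | some l0 =>
                rw [PySem.Dict.getD_eq_get?_getD, hget] at hq
                exact (hkc p.2.2.1 l0 hget).2 q hq
            · simp only [List.mem_singleton] at hq; subst hq; exact Or.inr rfl
          · rw [if_neg hss] at hs; exact hkc s lst' hs
        have hnd' : (w.modify p.2.2.1 [] (· ++ [p])).keys.Nodup := by
          simp only [PySem.Dict.modify]; exact PySem.Dict.nodup_keys_insert _ _ _ hnd
        obtain ⟨e1, e2, e3, e4⟩ := ih (w.modify p.2.2.1 [] (· ++ [p])) acc hkc' hnd'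
        rw [List.foldl_cons, hstep]
        refine ⟨by rw [e1]; simp [List.filter_cons, hk], ?_, e3, e4⟩
        refine e2.trans ?_
        refine List.Perm.trans ((pv_flat_modify w p.2.2.1 p hnd).append_right _) ?_
        simp [List.filter_cons, hk, List.append_assoc]
      · have h2' : vals.contains p.2.2.1 = true := by
          cases h : vals.contains p.2.2.1 with
          | true => rfl
          | false => exact absurd h h2
        have hk : pvKnown vals p.2 = true := by simp [pvKnown, h1', h2']
        have hstep : pvFile vals (w, acc) p = (w, acc ++ [p]) := by
          simp [pvFile, h1', h2']
        obtain ⟨e1, e2, e3, e4⟩ := ih w (acc ++ [p]) hkc hnd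
        rw [List.foldl_cons, hstep]
        refine ⟨by rw [e1]; simp [List.filter_cons, hk], ?_, e3, e4⟩
        refine e2.trans ?_
        simp [List.filter_cons, hk]

-- the trigger fold over the round's new symbols: conserves the waiting pool,
-- releases only ready gates, and leaves every waiting key undefined
theorem pvTriggerAux (vals : PvVals) (syms : List String) :
    ∀ (w : PvWait) (acc : List (Int × PvGate)),
    pvKeyCond vals syms w → w.keys.Nodup →
    (((syms.foldl (pvTrigger vals) (w, acc)).2 ++
        (syms.foldl (pvTrigger vals) (w, acc)).1.values.flatten).Perm
      (acc ++ w.values.flatten)) ∧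
    (∀ p ∈ (syms.foldl (pvTrigger vals) (w, acc)).2, p ∈ acc ∨ pvKnown vals p.2 = true) ∧
    pvKeyCond vals [] (syms.foldl (pvTrigger vals) (w, acc)).1 ∧
    (syms.foldl (pvTrigger vals) (w, acc)).1.keys.Nodup := by
  induction syms with
  | nil =>
    intro w acc hkc hnd
    exact ⟨List.Perm.refl _, fun p hp => Or.inl hp, hkc, hnd⟩
  | cons s rest ih =>
    intro w acc hkc hnd
    have hkcE : pvKeyCond vals rest (w.erase s) := by
      intro s' lst' hs'
      by_cases hss : s' = s
      · subst hss; rw [pv_get?_erase_self] at hs'; exact absurd hs' (by simp)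
      · rw [pv_get?_erase_of_ne w s s' hss] at hs'
        obtain ⟨hd, hm⟩ := hkc s' lst' hs'
        refine ⟨?_, hm⟩
        rcases hd with hd | hd
        · exact Or.inl hd
        · rcases List.mem_cons.mp hd with hd | hd
          · exact absurd hd hss
          · exact Or.inr hd
    have hndE : (w.erase s).keys.Nodup := pv_nodup_keys_erase w s hnd
    obtain ⟨f1, f2, f3, f4⟩ := pvFileAux vals rest (w.getD s []) (w.erase s) acc hkcE hndE
    rw [List.foldl_cons]
    have hstep : pvTrigger vals (w, acc) s
        = (w.getD s []).foldl (pvFile vals) (w.erase s, acc) := rfl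
    rw [hstep]
    set st1 := (w.getD s []).foldl (pvFile vals) (w.erase s, acc) with hst1
    obtain ⟨g1, g2, g3, g4⟩ := ih st1.1 st1.2 f3 f4
    refine ⟨?_, ?_, g3, g4⟩
    · refine g1.trans ?_
      rw [f1]
      -- (acc ++ lstK) ++ flat st1.1 ~ acc ++ flat w
      refine List.Perm.trans (List.Perm.append_left _ f2) ?_
      have hpart := List.filter_append_perm (fun p => pvKnown vals p.2) (w.getD s [])
      have hsplit := pv_flat_erase w s hnd
      rw [List.append_assoc]
      refine List.Perm.trans ?_ ((hsplit.append_left acc).symm)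
      refine List.Perm.append_left acc ?_
      -- lstK ++ (flat erase ++ lst¬K) ~ getD ++ flat erase
      refine List.Perm.trans (List.Perm.append_left _ (List.perm_append_comm)) ?_
      rw [← List.append_assoc]
      exact hpart.append_right _
    · intro p hp
      rcases g2 p hp with hp' | hp'
      · rw [f1] at hp'
        rcases List.mem_append.mp hp' with hp'' | hp''
        · exact Or.inl hp''
        · have := List.of_mem_filter hp''
          exact Or.inr this
      · exact Or.inr hp'

theorem pvKeyCondMono (vals vals' : PvVals) (ns : List String) (w : PvWait)
    (hk : vals'.keys = vals.keys ++ ns) (h : pvKeyCond vals [] w) : pvKeyCond vals' ns w := by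
  intro s lst hs
  obtain ⟨hd, hm⟩ := h s lst hs
  refine ⟨?_, hm⟩
  rcases hd with hd | hd
  · by_cases hc : vals'.contains s = true
    · have hmem : s ∈ vals'.keys := (PySem.Dict.contains_iff_mem_keys vals' s).mp hc
      rw [hk] at hmem
      rcases List.mem_append.mp hmem with h' | h'
      · have : vals.contains s = true := (PySem.Dict.contains_iff_mem_keys vals s).mpr h'
        rw [this] at hd; exact absurd hd (by simp)
      · exact Or.inr h'
    · left
      cases h' : vals'.contains s with
      | true => exact absurd h' hc
      | false => rfl
  · simp at hd

theorem pvWAll_not_known (vals : PvVals) (w : PvWait) (hnd : w.keys.Nodup)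
    (hkc : pvKeyCond vals [] w) : ∀ p ∈ w.values.flatten, pvKnown vals p.2 = false := by
  intro p hp
  obtain ⟨s, lst, hget, hmem⟩ := pv_mem_flat w hnd p hp
  obtain ⟨hd, hm⟩ := hkc s lst hget
  rcases hd with hd | hd
  · rcases hm p hmem with h | h
    · subst h; simp [pvKnown, hd]
    · subst h; simp [pvKnown, hd]
  · simp at hd

-- lockstep simulation: A's pass loop = B's round loop, under the worklist invariant
theorem pvMain : ∀ (fuel n : Nat) (L : List (Int × PvGate)) (vals : PvVals) (w : PvWait)
    (done : Nat),
    L.length < fuel →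
    L.Pairwise (fun p q => p.1 < q.1) →
    vals.keys.Nodup →
    pvKeyCond vals [] w →
    w.keys.Nodup →
    ((w.values.flatten).Perm (L.filter (fun p => !pvKnown vals p.2))) →
    done + L.length = n →
    pvLoopA fuel (L.map Prod.snd) vals
      = pvLoopB n fuel w (L.filter (fun p => pvKnown vals p.2)) vals done := by
  intro fuel
  induction fuel with
  | zero => intro n L vals w done hf _ _ _ _ _ _; exact absurd hf (Nat.not_lt_zero _)
  | succ f ih =>
    intro n L vals w done hf hsort hvnd hkc hwnd hperm hdone
    by_cases hL : L = []
    · subst hL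
      have hdn : done = n := by simpa using hdone
      simp [pvLoopA, pvLoopB, hdn]
    · have hmapne : L.map Prod.snd ≠ [] := by simpa using hL
      have hpass : pvPassA vals.keys (L.map Prod.snd) vals
          = ((L.filter (fun p => !pvKnown vals p.2)).map Prod.snd,
             ((L.filter (fun p => pvKnown vals p.2)).map Prod.snd).foldl pvEvalGate vals) := by
        unfold pvPassA; rw [pvPassA_eq]; simp
      by_cases hr : L.filter (fun p => pvKnown vals p.2) = []
      · have hallfalse : ∀ p ∈ L, pvKnown vals p.2 = false := by
          intro p hp
          have h' := List.filter_eq_nil_iff.mp hr p hp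
          cases h : pvKnown vals p.2 with
          | true => exact absurd h h'
          | false => rfl
        have hfneg : L.filter (fun p => !pvKnown vals p.2) = L :=
          List.filter_eq_self.mpr (fun p hp => by rw [hallfalse p hp]; rfl)
        have hpass' : pvPassA vals.keys (L.map Prod.snd) vals = (L.map Prod.snd, vals) := by
          rw [hpass, hfneg, hr]; simp
        have hdn : done ≠ n := by
          have : 0 < L.length := List.length_pos_of_ne_nil hL
          omega
        simp [pvLoopA, pvLoopB, hmapne, hr, hpass', hdn]
      · have hlen : (L.filter (fun p => pvKnown vals p.2)).length
            + (L.filter (fun p => !pvKnown vals p.2)).length = L.length := by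
          have := (List.filter_append_perm (fun p => pvKnown vals p.2) L).length_eq
          simpa using this
        have hKpos : 0 < (L.filter (fun p => pvKnown vals p.2)).length :=
          List.length_pos_of_ne_nil hr
        have hne : (L.filter (fun p => !pvKnown vals p.2)).map Prod.snd ≠ L.map Prod.snd := by
          intro he
          have := congrArg List.length he
          simp only [List.length_map] at this
          omega
        obtain ⟨ns, hrv, hkeys⟩ := pvRoundAux (L.filter (fun p => pvKnown vals p.2)) vals []
        have hndN : (((L.filter (fun p => pvKnown vals p.2)).map Prod.snd).foldl pvEvalGate vals).keys.Nodup :=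
          pvFoldEval_nodup _ vals hvnd
        have hkcN := pvKeyCondMono vals _ ns w hkeys hkc
        obtain ⟨t1, t2, t3, t4⟩ := pvTriggerAux
          (((L.filter (fun p => pvKnown vals p.2)).map Prod.snd).foldl pvEvalGate vals)
          ns w [] hkcN hwnd
        set valsN := ((L.filter (fun p => pvKnown vals p.2)).map Prod.snd).foldl pvEvalGate vals with hvalsN
        set tw := ns.foldl (pvTrigger valsN) (w, []) with htw
        have hnk := pvWAll_not_known valsN tw.1 t4 t3
        have ht2known : ∀ p ∈ tw.2, pvKnown valsN p.2 = true :=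
          fun p hp => (t2 p hp).resolve_left (by simp)
        have hconsv : (tw.2 ++ tw.1.values.flatten).Perm (w.values.flatten) := by
          simpa using t1
        have hnxt : tw.2.Perm
            ((L.filter (fun p => !pvKnown vals p.2)).filter (fun p => pvKnown valsN p.2)) := by
          have h1 := hconsv.filter (fun p => pvKnown valsN p.2)
          rw [List.filter_append] at h1
          rw [List.filter_eq_self.mpr (fun p hp => ht2known p hp)] at h1
          rw [List.filter_eq_nil_iff.mpr (fun p hp => by rw [hnk p hp]; simp)] at h1
          rw [List.append_nil] at h1
          exact h1.trans (hperm.filter _)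
        have hw'' : (tw.1.values.flatten).Perm
            ((L.filter (fun p => !pvKnown vals p.2)).filter (fun p => !pvKnown valsN p.2)) := by
          have h1 := hconsv.filter (fun p => !pvKnown valsN p.2)
          rw [List.filter_append] at h1
          rw [List.filter_eq_nil_iff.mpr (fun p hp => by rw [ht2known p hp]; simp)] at h1
          rw [List.filter_eq_self.mpr (fun p hp => by rw [hnk p hp]; rfl)] at h1
          rw [List.nil_append] at h1
          exact h1.trans (hperm.filter _)
        have hsorted : PySem.List.sorted tw.2 (fun p => p.1) false
            = (L.filter (fun p => !pvKnown vals p.2)).filter (fun p => pvKnown valsN p.2) := by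
          apply PySem.List.sorted_eq_of_perm_of_pairwise_lt
          · exact hnxt.symm
          · exact List.Pairwise.sublist
              (List.filter_sublist.trans List.filter_sublist) hsort
        have recur := ih n (L.filter (fun p => !pvKnown vals p.2)) valsN tw.1
          (done + (L.filter (fun p => pvKnown vals p.2)).length)
          (by omega)
          (List.Pairwise.sublist List.filter_sublist hsort)
          hndN t3 t4 hw''
          (by omega)
        simp only [pvLoopA, pvLoopB, if_neg hmapne, if_neg hr, hpass, if_neg hne, hrv,
          List.nil_append, ← htw, hsorted, ← hvalsN]
        exact recur

-- ===== VERDICT (by name: the statement is the Claim_ definition above) =====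
theorem evaluate_spec : Claim_equal_evaluate := by
  unfold Claim_equal_evaluate
  intro gates inputs _
  unfold Spec_evaluate evaluate evaluate_alt
  have hkcE : pvKeyCond (PySem.Dict.ofList inputs) [] PySem.Dict.empty := by
    intro s lst hs
    rw [PySem.Dict.get?_empty] at hs
    exact absurd hs (by simp)
  have hndE : ((PySem.Dict.empty : PvWait)).keys.Nodup := by
    simp [PySem.Dict.empty, PySem.Dict.keys]
  obtain ⟨f1, f2, f3, f4⟩ := pvFileAux (PySem.Dict.ofList inputs) []
    (PySem.List.enumerate gates) PySem.Dict.empty [] hkcE hndE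
  have hmain := pvMain (gates.length + 1) gates.length (PySem.List.enumerate gates)
    (PySem.Dict.ofList inputs)
    ((PySem.List.enumerate gates).foldl (pvFile (PySem.Dict.ofList inputs)) (PySem.Dict.empty, [])).1
    0
    (by rw [PySem.List.length_enumerate]; omega)
    (PySem.List.pairwise_lt_enumerate gates 0)
    (PySem.Dict.nodup_keys_ofList inputs)
    f3 f4
    (by refine f2.trans ?_; simp [PySem.Dict.empty, PySem.Dict.values])
    (by rw [PySem.List.length_enumerate]; omega)
  rw [PySem.List.map_snd_enumerate gates 0] at hmain
  rw [List.nil_append] at f1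
  simp only [hmain, f1]
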